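-- pv_equiv track=rewrite | github.com/ndririchard/GymJunky | utility.py | token
-- ===== SOURCE A (Python) =====
-- def token(length):
--     """
--         OUTPUT -> str
--     """
--     alphabet = "abcdefghijklmnopqrstuvwxyz \
--         ABCDEFGHIJKLMNOPQRSTUVWXYZ0123456789"
--     res = ""
--     i = 0
--     while i < length:
--         res += alphabet[i % len(alphabet)]
--         i += 1
--     return res
-- ===== SOURCE B (Python) =====
-- def token(length):
--     """
--         OUTPUT -> str
--     """
--     alphabet = "abcdefghijklmnopqrstuvwxyz \
--         ABCDEFGHIJKLMNOPQRSTUVWXYZ0123456789"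
--     reps = length // len(alphabet) + 1
--     return (alphabet * reps)[:length]
-- ===== Notes on version B (the rewrite author's own statement) =====
-- stated objective: faster
-- what changed: Replaced the per-character while loop (append alphabet[i % 71] one index at a time) by a block construction: compute how many whole copies of the alphabet cover the length, concatenate them, and slice to length.
import Mathlib
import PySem

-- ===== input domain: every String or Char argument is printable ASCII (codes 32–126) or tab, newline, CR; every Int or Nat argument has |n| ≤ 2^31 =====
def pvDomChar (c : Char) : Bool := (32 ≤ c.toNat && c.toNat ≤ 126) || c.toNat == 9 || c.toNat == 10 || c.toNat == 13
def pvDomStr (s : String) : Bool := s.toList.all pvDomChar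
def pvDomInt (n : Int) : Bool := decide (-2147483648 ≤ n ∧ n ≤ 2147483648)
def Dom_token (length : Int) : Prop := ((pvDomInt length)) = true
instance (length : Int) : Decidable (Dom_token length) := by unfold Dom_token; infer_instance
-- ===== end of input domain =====

-- B replaces A's per-character while loop by a block construction (repeat the
-- alphabet enough whole times, then slice to length); objective: simpler.

-- ===== PORT A =====
-- the alphabet literal with the backslash line-continuation whitespace, as in the Python source
def tokenAlphaA : List Char :=
  "abcdefghijklmnopqrstuvwxyz         ABCDEFGHIJKLMNOPQRSTUVWXYZ0123456789".toList

-- the while loop: res += alphabet[i % len(alphabet)]; i += 1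
def tokenLoop (length : Int) (res : List Char) (i : Int) : List Char :=
  if _h : i < length then
    tokenLoop length
      (res ++ [PySem.List.pyGetD tokenAlphaA (PySem.Int.mod i (tokenAlphaA.length : Int)) ' '])
      (i + 1)
  else res
termination_by (length - i).toNat
decreasing_by omega

def token (length : Int) : String := String.mk (tokenLoop length [] 0)

-- ===== PORT B =====
def tokenAlphaB : List Char :=
  "abcdefghijklmnopqrstuvwxyz         ABCDEFGHIJKLMNOPQRSTUVWXYZ0123456789".toList

-- reps = length // len(alphabet) + 1; return (alphabet * reps)[:length]
def token_alt (length : Int) : String :=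
  let reps : Int := PySem.Int.floordiv length (tokenAlphaB.length : Int) + 1
  String.mk (PySem.List.slice (List.flatten (List.replicate reps.toNat tokenAlphaB)) none (some length))

-- ===== PRECONDITION & SPEC =====
def Spec_token (length : Int) (out : String) : Prop := out = token_alt length
instance (length : Int) (out : String) : Decidable (Spec_token length out) := by
  unfold Spec_token; infer_instance

-- ===== CLAIM (what is proved, stated in full; the proofs are below) =====
def Claim_equal_token : Prop := ∀ (length : Int), Dom_token length → Spec_token length (token length)

-- ===== LEMMAS AND PROOFS =====

theorem tokenAlphaA_length : tokenAlphaA.length = 71 := by decide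

theorem tokenAlphaB_eq : tokenAlphaB = tokenAlphaA := rfl

-- A's loop, characterised: it appends the cyclic characters for k = i, …, length-1.
theorem tokenLoop_eq (length : Int) : ∀ (n : Nat) (i : Int) (res : List Char),
    0 ≤ i → (length - i).toNat = n →
    tokenLoop length res i =
      res ++ (List.range n).map (fun k => tokenAlphaA.getD ((i.toNat + k) % 71) ' ') := by
  intro n
  induction n with
  | zero =>
    intro i res hi hn
    rw [tokenLoop]
    have : ¬ i < length := by omega
    simp [this]
  | succ m ih =>
    intro i res hi hn
    rw [tokenLoop]
    have hlt : i < length := by omega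
    simp only [hlt, dif_pos]
    rw [ih (i + 1) _ (by omega) (by omega)]
    have hmod : PySem.Int.mod i (tokenAlphaA.length : Int)
        = ((i.toNat % 71 : Nat) : Int) := by
      rw [tokenAlphaA_length]
      have h1 : i = ((i.toNat : Nat) : Int) := by omega
      rw [h1]
      exact_mod_cast PySem.Int.mod_natCast i.toNat 71
    rw [hmod, PySem.List.pyGetD_natCast, List.append_assoc]
    congr 1
    rw [List.range_succ_eq_map, List.map_cons, List.map_map, List.singleton_append]
    congr 1
    simp only [List.map_inj_left]
    intro k hk
    have h2 : (i + 1).toNat + k = i.toNat + (k + 1) := by omega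
    simp [h2, Nat.succ_eq_add_one]

theorem getElem?_flatten_replicate {α : Type} (l : List α) :
    ∀ (m k : Nat), k < m * l.length →
    (List.flatten (List.replicate m l))[k]? = l[k % l.length]? := by
  intro m
  induction m with
  | zero => intro k hk; simp at hk
  | succ m ih =>
    intro k hk
    have hk' : k < m * l.length + l.length := by
      calc k < (m + 1) * l.length := hk
        _ = m * l.length + l.length := by ring
    rw [List.replicate_succ, List.flatten_cons, List.getElem?_append]
    by_cases h : k < l.length
    · simp [h, Nat.mod_eq_of_lt h]
    · have hl : 0 < l.length := by
        rcases Nat.eq_zero_or_pos l.length with h0 | h0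
        · rw [h0, Nat.mul_zero] at hk'; omega
        · exact h0
      rw [if_neg h, ih (k - l.length) (by omega)]
      have hmod : (k - l.length) % l.length = k % l.length := by
        conv_rhs => rw [show k = l.length + (k - l.length) by omega, Nat.add_mod_left]
      rw [hmod]

-- ===== VERDICT (by name: the statement is the Claim_ definition above) =====
theorem token_spec : Claim_equal_token := by
  intro length _
  unfold Spec_token token token_alt
  rw [tokenAlphaB_eq, tokenAlphaA_length]
  simp only [Nat.cast_ofNat]
  apply congrArg String.mk
  rw [tokenLoop_eq length length.toNat 0 [] le_rfl (by omega)]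
  simp only [List.nil_append, Int.toNat_zero, Nat.zero_add]
  by_cases hneg : length < 0
  · -- both sides are empty
    have h1 : length.toNat = 0 := by omega
    have h2 : PySem.Int.floordiv length 71 + 1 ≤ 0 := by
      have := PySem.Int.floordiv_mul_add_mod length 71
      have hm := (PySem.Int.mod_nonneg length (b := 71) (by omega))
      have hl := PySem.Int.mod_lt length (b := 71) (by omega)
      nlinarith
    have h3 : (PySem.Int.floordiv length 71 + 1).toNat = 0 := by omega
    have hnil : (List.replicate (PySem.Int.floordiv length 71 + 1).toNat tokenAlphaA).flatten
        = ([] : List Char) := by rw [h3]; rfl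
    rw [hnil, h1]
    simp [PySem.List.slice]
  · push_neg at hneg
    have hfd : PySem.Int.floordiv length 71 = ((length.toNat / 71 : Nat) : Int) := by
      have h1 : length = ((length.toNat : Nat) : Int) := by omega
      rw [h1]
      exact_mod_cast PySem.Int.floordiv_natCast length.toNat 71
    rw [PySem.List.slice_to _ hneg]
    set n := length.toNat with hn
    set m := (PySem.Int.floordiv length 71 + 1).toNat with hm
    have hcover : n ≤ m * 71 := by
      have hd := Nat.div_add_mod n 71
      have hmod := Nat.mod_lt n (y := 71) (by omega)
      have : m = n / 71 + 1 := by omega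
      omega
    apply List.ext_getElem?
    intro k
    by_cases hk : k < n
    · rw [List.getElem?_take_of_lt hk]
      rw [getElem?_flatten_replicate tokenAlphaA m k (by rw [tokenAlphaA_length]; omega)]
      rw [tokenAlphaA_length]
      rw [List.getElem?_map]
      rw [List.getElem?_range hk]
      have hlt : k % 71 < tokenAlphaA.length := by rw [tokenAlphaA_length]; exact Nat.mod_lt _ (by omega)
      simp [List.getD, List.getElem?_eq_getElem hlt]
    · rw [List.getElem?_eq_none (by simp; omega),
          List.getElem?_eq_none (by simp; omega)]
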